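-- pv_equiv track=rewrite | github.com/thealper2/codewars-solutions | 7-kyu/kooka_counter.py | kooka_counter
-- ===== SOURCE A (Python) =====
-- def kooka_counter(laughing):
--     count = 0
--     n = len(laughing)
--     prev = None
--     for i in range(0, n, 2):
--         if laughing[i:i+2] == 'ha' and prev != 'ha':
--             count += 1
--         elif laughing[i:i+2] == 'Ha' and prev != 'Ha':
--             count += 1
--
--         prev = laughing[i:i+2]
--
--     return count
-- ===== SOURCE B (Python) =====
-- def kooka_counter(laughing):
--     # Greedy run-consuming scan: when a laugh chunk appears, count it once and
--     # strip the whole maximal run of that same chunk; no prev variable needed.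
--     def eat(s, pat):
--         while s[:2] == pat:
--             s = s[2:]
--         return s
--     count = 0
--     s = laughing
--     while s:
--         head = s[:2]
--         if head in ('ha', 'Ha'):
--             count += 1
--             s = eat(s, head)
--         else:
--             s = s[2:]
--     return count
-- ===== Notes on version B (the rewrite author's own statement) =====
-- stated objective: alternative
-- what changed: Replaced A's prev-tracking loop over fixed 2-char offsets by a greedy run-consuming scan on the remaining string: when a laugh chunk is seen it is counted once and the whole maximal run of that same chunk is stripped before continuing, so no previous-chunk state is kept.
import Mathlib
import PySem

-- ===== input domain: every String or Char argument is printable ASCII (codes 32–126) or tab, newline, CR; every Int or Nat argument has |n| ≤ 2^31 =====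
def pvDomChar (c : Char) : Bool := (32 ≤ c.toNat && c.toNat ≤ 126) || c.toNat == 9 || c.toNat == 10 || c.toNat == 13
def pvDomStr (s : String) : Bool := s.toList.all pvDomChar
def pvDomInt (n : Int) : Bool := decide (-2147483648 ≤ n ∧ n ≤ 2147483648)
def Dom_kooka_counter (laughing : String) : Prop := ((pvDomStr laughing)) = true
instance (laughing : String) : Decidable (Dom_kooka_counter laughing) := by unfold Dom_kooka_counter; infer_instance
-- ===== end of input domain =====

-- B replaces A's prev-tracking chunk loop by a greedy run-consuming scan:
-- count a laugh chunk once, then strip the whole maximal run of that chunk (simpler decomposition, same cost).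

-- ===== PORT A =====
-- Port of A, on the List Char side (Python string slicing/comparison is exact on the char list).
def kooka_counter (laughing : String) : Int :=
  let cs := laughing.toList
  let n : Int := PySem.Str.len laughing
  let st := (PySem.List.pyRange 0 n 2).foldl
    (fun (st : Int × Option (List Char)) i =>
      let chunk := PySem.List.slice cs (some i) (some (i + 2))
      let count :=
        if chunk = ['h', 'a'] ∧ st.2 ≠ some ['h', 'a'] then st.1 + 1
        else if chunk = ['H', 'a'] ∧ st.2 ≠ some ['H', 'a'] then st.1 + 1
        else st.1
      (count, some chunk))
    (0, none)
  st.1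

-- ===== PORT B =====
-- Source B's 'eat': while s[:2] == pat: s = s[2:]
def kcEat (pat : List Char) : List Char → List Char
  | [] => []
  | [a] => if [a] = pat then kcEat pat [] else [a]
  | a :: b :: r => if [a, b] = pat then kcEat pat r else a :: b :: r

-- termination fact for the main while loop: eat never lengthens the string
lemma kcEat_length_le (pat s : List Char) : (kcEat pat s).length ≤ s.length := by
  induction s using kcEat.induct pat
  all_goals simp_all [kcEat]
  all_goals omega

-- Source B's main while loop over the remaining string
def kcLoop : List Char → Int
  | [] => 0
  | [a] =>
    if ([a] : List Char) = ['h', 'a'] ∨ ([a] : List Char) = ['H', 'a'] then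
      1 + kcLoop (kcEat [a] [a])
    else kcLoop ([] : List Char)
  | a :: b :: r =>
    if ([a, b] : List Char) = ['h', 'a'] ∨ ([a, b] : List Char) = ['H', 'a'] then
      1 + kcLoop (kcEat [a, b] (a :: b :: r))
    else kcLoop r
termination_by s => s.length
decreasing_by
  · simp [kcEat]
  · simp
  · have h1 : kcEat [a, b] (a :: b :: r) = kcEat [a, b] r := by simp [kcEat]
    have h2 := kcEat_length_le [a, b] r
    rw [h1]; simp; omega
  · simp

def kooka_counter_alt (laughing : String) : Int := kcLoop laughing.toList

-- ===== PRECONDITION & SPEC =====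
def Spec_kooka_counter (laughing : String) (out : Int) : Prop := out = kooka_counter_alt laughing
instance (laughing : String) (out : Int) : Decidable (Spec_kooka_counter laughing out) := by unfold Spec_kooka_counter; infer_instance

-- ===== CLAIM (what is proved, stated in full; the proofs are below) =====
def Claim_equal_kooka_counter : Prop := ∀ (laughing : String), Dom_kooka_counter laughing → Spec_kooka_counter laughing (kooka_counter laughing)

-- ===== LEMMAS AND PROOFS =====

-- A's chunk sequence, materialized structurally
def chunkList : List Char → List (List Char)
  | [] => []
  | [a] => [[a]]
  | a :: b :: r => [a, b] :: chunkList r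

-- A's loop step on an already-materialized chunk
def kcStepA (st : Int × Option (List Char)) (c : List Char) : Int × Option (List Char) :=
  (if c = ['h', 'a'] ∧ st.2 ≠ some ['h', 'a'] then st.1 + 1
   else if c = ['H', 'a'] ∧ st.2 ≠ some ['H', 'a'] then st.1 + 1
   else st.1, some c)

-- recursive characterization of A's count from a given prev
def kcA : Option (List Char) → List Char → Int
  | _, [] => 0
  | _, [_] => 0
  | prev, a :: b :: r =>
    (if [a, b] = ['h', 'a'] ∧ prev ≠ some ['h', 'a'] then 1
     else if [a, b] = ['H', 'a'] ∧ prev ≠ some ['H', 'a'] then 1 else 0) + kcA (some [a, b]) r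

-- the chunk list as a pure drop/take map
lemma chunk_take_map (cs : List Char) :
    (List.range ((cs.length + 1) / 2)).map (fun k => (cs.drop (2 * k)).take 2) = chunkList cs := by
  induction cs using chunkList.induct with
  | case1 => simp [chunkList]
  | case2 a => simp [chunkList]
  | case3 a b r ih =>
      have hlen : (( (a :: b :: r).length + 1) / 2) = (r.length + 1) / 2 + 1 := by
        simp [List.length_cons]; omega
      rw [hlen, List.range_succ_eq_map, List.map_cons, List.map_map]
      simp only [chunkList, Nat.mul_zero, List.drop_zero]
      refine congrArg₂ List.cons (by simp) ?_
      rw [← ih]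
      apply List.map_congr_left
      intro k _
      have h2 : 2 * Nat.succ k = 2 * k + 2 := by omega
      simp only [Function.comp_apply, h2, List.drop_succ_cons]

-- A's index/slice map over range(0, n, 2) is exactly chunkList
lemma chunk_map (cs : List Char) :
    (PySem.List.pyRange 0 (cs.length : Int) 2).map
      (fun i => PySem.List.slice cs (some i) (some (i + 2))) = chunkList cs := by
  rw [PySem.List.pyRange_of_pos 0 (cs.length : Int) (by norm_num), List.map_map]
  have hm : (if (0 : Int) < (cs.length : Int)
      then (((cs.length : Int) - 0 + 2 - 1) / 2).toNat else 0) = (cs.length + 1) / 2 := by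
    split_ifs with h
    · omega
    · omega
  rw [hm, ← chunk_take_map cs]
  apply List.map_congr_left
  intro k _
  show PySem.List.slice cs (some (0 + 2 * (k : Int))) (some (0 + 2 * (k : Int) + 2)) = _
  have h1 : (0 + 2 * (k : Int)) = ((2 * k : Nat) : Int) := by push_cast; ring
  rw [h1]
  simpa using PySem.List.slice_natCast_add cs (2 * k) 2

-- folding A's step over the chunk list computes kcA
lemma foldl_chunk (cs : List Char) (count : Int) (prev : Option (List Char)) :
    ((chunkList cs).foldl kcStepA (count, prev)).1 = count + kcA prev cs := by
  induction cs using chunkList.induct generalizing count prev with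
  | case1 => simp [chunkList, kcA]
  | case2 a => simp [chunkList, kcA, kcStepA]
  | case3 a b r ih =>
      simp only [chunkList, kcA, List.foldl_cons]
      rw [show kcStepA (count, prev) [a, b] =
            ((kcStepA (count, prev) [a, b]).1, some [a, b]) from rfl, ih]
      unfold kcStepA
      dsimp only
      split_ifs <;> try ring

-- prev-normalizing form of B's remaining string
def kcEatP (prev : Option (List Char)) (cs : List Char) : List Char :=
  if prev = some ['h', 'a'] then kcEat ['h', 'a'] cs
  else if prev = some ['H', 'a'] then kcEat ['H', 'a'] cs
  else cs

-- main bridge: A's recursive count from prev = B's loop on the eaten remainder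
lemma kcA_eq_kcLoop (prev : Option (List Char)) (cs : List Char) :
    kcA prev cs = kcLoop (kcEatP prev cs) := by
  induction prev, cs using kcA.induct with
  | case1 prev => unfold kcEatP; split_ifs <;> simp [kcA, kcEat, kcLoop]
  | case2 prev a => unfold kcEatP; split_ifs <;> simp [kcA, kcEat, kcLoop]
  | case3 prev a b r ih =>
      by_cases hha : ([a, b] : List Char) = ['h', 'a']
      · obtain ⟨rfl, rfl⟩ : a = 'h' ∧ b = 'a' := by simpa using hha
        by_cases hp1 : prev = some ['h', 'a']
        · subst hp1; simp_all [kcA, kcEatP, kcEat]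
        · by_cases hp2 : prev = some ['H', 'a']
          · subst hp2; simp_all [kcA, kcEatP, kcEat, kcLoop]
          · simp_all [kcA, kcEatP, kcEat, kcLoop]
      · by_cases hHa : ([a, b] : List Char) = ['H', 'a']
        · obtain ⟨rfl, rfl⟩ : a = 'H' ∧ b = 'a' := by simpa using hHa
          by_cases hp2 : prev = some ['H', 'a']
          · subst hp2; simp_all [kcA, kcEatP, kcEat]
          · by_cases hp1 : prev = some ['h', 'a']
            · subst hp1; simp_all [kcA, kcEatP, kcEat, kcLoop]
            · simp_all [kcA, kcEatP, kcEat, kcLoop]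
        · -- the chunk is not a laugh: no count, B just drops it
          have hEP : kcEatP prev (a :: b :: r) = a :: b :: r := by
            unfold kcEatP; split_ifs <;> simp [kcEat, hha, hHa]
          have hEPr : kcEatP (some [a, b]) r = r := by
            unfold kcEatP; split_ifs with h1 h2
            · exact absurd (by simpa using h1) hha
            · exact absurd (by simpa using h2) hHa
            · rfl
          rw [hEP, kcA, if_neg (fun h => hha h.1), if_neg (fun h => hHa h.1), zero_add]
          rw [kcLoop, if_neg (fun h => h.elim hha hHa)]
          rw [ih, hEPr]

-- ===== VERDICT (by name: the statement is the Claim_ definition above) =====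
theorem kooka_counter_spec : Claim_equal_kooka_counter := by
  intro laughing _
  show kooka_counter laughing = kooka_counter_alt laughing
  unfold kooka_counter kooka_counter_alt
  rw [show PySem.Str.len laughing = (laughing.toList.length : Int) from by
        simp [PySem.Str.len_eq]]
  show (List.foldl
      (fun st i => kcStepA st (PySem.List.slice laughing.toList (some i) (some (i + 2))))
      (0, none) (PySem.List.pyRange 0 (laughing.toList.length : Int) 2)).1 =
    kcLoop laughing.toList
  rw [← List.foldl_map, chunk_map, foldl_chunk, zero_add, kcA_eq_kcLoop]
  simp [kcEatP]
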